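-- pv_equiv track=rewrite | github.com/lauuu-pt/SI-2 | teste.py | modelo
-- ===== SOURCE A (Python) =====
-- def modelo(pacman, obstaculos):
--     modelo = set()
--     for xx in [-1, 0, 1]:
--         for yy in [-1, 0, 1]:
--             for zz in [-1, 0, 1]:
--                 if (xx != 0 or yy != 0 or zz != 0):
--                     x = pacman[0] + xx
--                     y = pacman[1] + yy
--                     z = pacman[2] + zz
--                     if (x >= 0 and y >= 0 and z >= 0):
--                         modelo.add((x, y, z))
--     obs_modelo = set()
--     for pos in modelo:
--         if pos in obstaculos:
--             obs_modelo.add(pos)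
--     return obs_modelo
-- ===== SOURCE B (Python) =====
-- def modelo(pacman, obstaculos):
--     obs_modelo = set()
--     for o in obstaculos:
--         if (o != pacman
--                 and o[0] >= 0 and o[1] >= 0 and o[2] >= 0
--                 and abs(o[0] - pacman[0]) <= 1
--                 and abs(o[1] - pacman[1]) <= 1
--                 and abs(o[2] - pacman[2]) <= 1):
--             obs_modelo.add(o)
--     return obs_modelo
-- ===== Notes on version B (the rewrite author's own statement) =====
-- stated objective: alternative
-- what changed: Instead of generating the 26 neighbour cells and testing each for membership in obstaculos, B makes a single pass over obstaculos and keeps each obstacle that differs from pacman, has all coordinates >= 0 and is within Chebyshev distance 1 of pacman.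
import Mathlib
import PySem

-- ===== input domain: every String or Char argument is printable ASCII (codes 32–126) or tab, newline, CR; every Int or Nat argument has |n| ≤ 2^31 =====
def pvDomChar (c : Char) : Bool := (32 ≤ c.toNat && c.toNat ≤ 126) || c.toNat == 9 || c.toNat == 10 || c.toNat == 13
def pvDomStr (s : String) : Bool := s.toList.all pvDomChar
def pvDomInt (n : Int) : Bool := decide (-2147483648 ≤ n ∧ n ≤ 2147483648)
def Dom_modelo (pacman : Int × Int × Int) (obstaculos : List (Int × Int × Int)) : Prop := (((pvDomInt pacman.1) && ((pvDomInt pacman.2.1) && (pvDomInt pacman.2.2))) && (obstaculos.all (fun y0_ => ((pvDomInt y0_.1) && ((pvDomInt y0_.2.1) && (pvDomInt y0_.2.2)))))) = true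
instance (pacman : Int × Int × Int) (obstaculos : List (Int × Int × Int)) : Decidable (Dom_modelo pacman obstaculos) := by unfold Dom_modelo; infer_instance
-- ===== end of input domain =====

-- B replaces A's generate-26-neighbours-then-membership-test strategy by one filtering pass over obstaculos (alternative, same cost).
-- Both Pythons return a SET; Python's set iteration order is not modelled, so both ports return the same
-- canonical representative of the returned set: its elements sorted by the injective key pvKey.

-- key used only to pick the canonical list representative of a returned set
def pvKey (p : Int × Int × Int) : Int ×ₗ (Int ×ₗ Int) := toLex (p.1, toLex (p.2.1, p.2.2))

-- ===== PORT A =====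
def modelo (pacman : Int × Int × Int) (obstaculos : List (Int × Int × Int)) : List (Int × Int × Int) :=
  -- modelo = set(); triple loop over xx, yy, zz in [-1, 0, 1]
  let m : PySem.Set (Int × Int × Int) :=
    [(-1 : Int), 0, 1].foldl (fun s xx =>
      [(-1 : Int), 0, 1].foldl (fun s yy =>
        [(-1 : Int), 0, 1].foldl (fun s zz =>
          if xx ≠ 0 ∨ yy ≠ 0 ∨ zz ≠ 0 then
            let x := pacman.1 + xx
            let y := pacman.2.1 + yy
            let z := pacman.2.2 + zz
            if x ≥ 0 ∧ y ≥ 0 ∧ z ≥ 0 then PySem.Set.add s (x, y, z) else s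
          else s) s) s) PySem.Set.empty
  -- obs_modelo = set(); for pos in modelo: if pos in obstaculos: obs_modelo.add(pos)
  let obs : PySem.Set (Int × Int × Int) :=
    m.foldl (fun s pos => if pos ∈ obstaculos then PySem.Set.add s pos else s) PySem.Set.empty
  PySem.List.sorted obs pvKey false   -- canonical representative of the returned set

-- ===== PORT B =====
def modelo_alt (pacman : Int × Int × Int) (obstaculos : List (Int × Int × Int)) : List (Int × Int × Int) :=
  -- obs_modelo = set(); single filtering pass over obstaculos
  let obs : PySem.Set (Int × Int × Int) :=
    obstaculos.foldl (fun s o =>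
      if o ≠ pacman ∧ 0 ≤ o.1 ∧ 0 ≤ o.2.1 ∧ 0 ≤ o.2.2 ∧
         |o.1 - pacman.1| ≤ 1 ∧ |o.2.1 - pacman.2.1| ≤ 1 ∧ |o.2.2 - pacman.2.2| ≤ 1 then
        PySem.Set.add s o
      else s) PySem.Set.empty
  PySem.List.sorted obs pvKey false   -- canonical representative of the returned set

-- ===== PRECONDITION & SPEC =====
def Spec_modelo (pacman : Int × Int × Int) (obstaculos : List (Int × Int × Int)) (out : List (Int × Int × Int)) : Prop := out = modelo_alt pacman obstaculos
instance (pacman : Int × Int × Int) (obstaculos : List (Int × Int × Int)) (out : List (Int × Int × Int)) : Decidable (Spec_modelo pacman obstaculos out) := by unfold Spec_modelo; infer_instance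

-- ===== CLAIM (what is proved, stated in full; the proofs are below) =====
def Claim_equal_modelo : Prop := ∀ (pacman : Int × Int × Int) (obstaculos : List (Int × Int × Int)), Dom_modelo pacman obstaculos → Spec_modelo pacman obstaculos (modelo pacman obstaculos)

-- ===== LEMMAS AND PROOFS =====

-- membership in a 'for …: if p a: s.add(v a)' loop
theorem mem_foldl_step {α β : Type} [BEq β] [LawfulBEq β] (x : β) (step : PySem.Set β → α → PySem.Set β)
    (Q : α → Prop) (h : ∀ s a, x ∈ step s a ↔ x ∈ s ∨ Q a) :
    ∀ (l : List α) (init : PySem.Set β), x ∈ l.foldl step init ↔ x ∈ init ∨ ∃ a ∈ l, Q a := by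
  intro l
  induction l with
  | nil => simp
  | cons a t ih =>
    intro init
    simp only [List.foldl_cons, ih, h, List.mem_cons]
    constructor
    · rintro (⟨hx | hq⟩ | ⟨b, hb, hQ⟩)
      · exact Or.inl hx
      · exact Or.inr ⟨a, Or.inl rfl, hq⟩
      · exact Or.inr ⟨b, Or.inr hb, hQ⟩
    · rintro (hx | ⟨b, rfl | hb, hQ⟩)
      · exact Or.inl (Or.inl hx)
      · exact Or.inl (Or.inr hQ)
      · exact Or.inr ⟨b, hb, hQ⟩

-- a 'for …: if p a: s.add(v a)' loop keeps the set duplicate-free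
theorem nodup_foldl_step {α β : Type} [BEq β] [LawfulBEq β] (step : PySem.Set β → α → PySem.Set β)
    (h : ∀ (s : PySem.Set β) a, s.Nodup → (step s a).Nodup) :
    ∀ (l : List α) (init : PySem.Set β), init.Nodup → (l.foldl step init).Nodup := by
  intro l
  induction l with
  | nil => simpa using fun _ h => h
  | cons a t ih => intro init hi; exact ih _ (h _ _ hi)

theorem nodup_add {β : Type} [BEq β] [LawfulBEq β] (s : PySem.Set β) (x : β) (h : s.Nodup) :
    (PySem.Set.add s x).Nodup := by
  by_cases hx : x ∈ s
  · simp [PySem.Set.add, PySem.Set.contains, hx, h]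
  · rw [PySem.Set.add]
    simp only [PySem.Set.contains]
    split
    · next hc => exact absurd (List.contains_iff_mem.1 hc) hx
    · refine List.Nodup.append h (List.nodup_singleton x) ?_
      intro a ha hb
      simp only [List.mem_singleton] at hb
      subst hb
      exact hx ha

theorem pvKey_injective : Function.Injective pvKey := by
  intro p q h
  cases p with | mk a p' => cases p' with | mk b c =>
  cases q with | mk a' q' => cases q' with | mk b' c' =>
  simpa [pvKey, toLex, Prod.ext_iff] using h

-- x is one of pacman's 26 neighbours with all coordinates ≥ 0
def Nbr (pacman x : Int × Int × Int) : Prop :=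
  x ≠ pacman ∧ 0 ≤ x.1 ∧ 0 ≤ x.2.1 ∧ 0 ≤ x.2.2 ∧
  |x.1 - pacman.1| ≤ 1 ∧ |x.2.1 - pacman.2.1| ≤ 1 ∧ |x.2.2 - pacman.2.2| ≤ 1

theorem mem_stage1 (pacman x : Int × Int × Int) :
    x ∈ ([(-1 : Int), 0, 1].foldl (fun s xx =>
      [(-1 : Int), 0, 1].foldl (fun s yy =>
        [(-1 : Int), 0, 1].foldl (fun s zz =>
          if xx ≠ 0 ∨ yy ≠ 0 ∨ zz ≠ 0 then
            if pacman.1 + xx ≥ 0 ∧ pacman.2.1 + yy ≥ 0 ∧ pacman.2.2 + zz ≥ 0 then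
              PySem.Set.add s (pacman.1 + xx, pacman.2.1 + yy, pacman.2.2 + zz)
            else s
          else s) s) s) (PySem.Set.empty : PySem.Set (Int × Int × Int)))
    ↔ Nbr pacman x := by
  rw [mem_foldl_step x _ (fun xx => ∃ yy ∈ [(-1 : Int), 0, 1], ∃ zz ∈ [(-1 : Int), 0, 1],
        (xx ≠ 0 ∨ yy ≠ 0 ∨ zz ≠ 0) ∧ (pacman.1 + xx ≥ 0 ∧ pacman.2.1 + yy ≥ 0 ∧ pacman.2.2 + zz ≥ 0) ∧
        x = (pacman.1 + xx, pacman.2.1 + yy, pacman.2.2 + zz))]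
  · obtain ⟨a, b, c⟩ := pacman
    obtain ⟨u, v, w⟩ := x
    simp only [PySem.Set.empty, List.not_mem_nil, false_or, List.mem_cons, List.not_mem_nil,
      or_false, Nbr, Prod.mk.injEq, ne_eq]
    constructor
    · rintro ⟨xx, hxx, yy, hyy, zz, hzz, hnz, hpos, rfl, rfl, rfl⟩
      simp only [not_and] at *
      constructor
      · intro h1 h2 h3; rcases hnz with h | h | h <;> omega
      · rcases hxx with rfl | rfl | rfl <;> rcases hyy with rfl | rfl | rfl <;>
          rcases hzz with rfl | rfl | rfl <;>
          simp only [abs_le] <;> omega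
    · rintro ⟨hne, h1, h2, h3, h4, h5, h6⟩
      refine ⟨u - a, ?_, v - b, ?_, w - c, ?_, ?_, by omega, by omega, by omega, by omega⟩
      · rw [abs_le] at h4; omega
      · rw [abs_le] at h5; omega
      · rw [abs_le] at h6; omega
      · simp only [not_and] at hne; by_contra hc; push Not at hc; apply hne <;> omega
  · intro s xx
    rw [mem_foldl_step x _ (fun yy => ∃ zz ∈ [(-1 : Int), 0, 1],
          (xx ≠ 0 ∨ yy ≠ 0 ∨ zz ≠ 0) ∧ (pacman.1 + xx ≥ 0 ∧ pacman.2.1 + yy ≥ 0 ∧ pacman.2.2 + zz ≥ 0) ∧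
          x = (pacman.1 + xx, pacman.2.1 + yy, pacman.2.2 + zz))]
    intro s' yy
    rw [mem_foldl_step x _ (fun zz =>
          (xx ≠ 0 ∨ yy ≠ 0 ∨ zz ≠ 0) ∧ (pacman.1 + xx ≥ 0 ∧ pacman.2.1 + yy ≥ 0 ∧ pacman.2.2 + zz ≥ 0) ∧
          x = (pacman.1 + xx, pacman.2.1 + yy, pacman.2.2 + zz))]
    intro s'' zz
    split_ifs with h1 h2
    · rw [PySem.Set.mem_add]
      constructor
      · rintro (h | rfl)
        · exact Or.inl h
        · exact Or.inr ⟨h1, h2, rfl⟩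
      · rintro (h | ⟨_, _, rfl⟩)
        · exact Or.inl h
        · exact Or.inr rfl
    · constructor
      · exact Or.inl
      · rintro (h | ⟨_, hp, _⟩)
        · exact h
        · exact absurd hp h2
    · constructor
      · exact Or.inl
      · rintro (h | ⟨hn, _, _⟩)
        · exact h
        · exact absurd hn h1

-- ===== VERDICT (by name: the statement is the Claim_ definition above) =====
theorem modelo_spec : Claim_equal_modelo := by
  intro pacman obstaculos _
  simp only [Spec_modelo, modelo, modelo_alt]
  apply PySem.List.sorted_eq_sorted_of_perm _ _ _ pvKey_injective
  rw [List.perm_ext_iff_of_nodup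
    (nodup_foldl_step _ (fun s a hs => by split_ifs with h; exacts [nodup_add _ _ hs, hs]) _ _ (by simp [PySem.Set.empty]))
    (nodup_foldl_step _ (fun s a hs => by split_ifs with h; exacts [nodup_add _ _ hs, hs]) _ _ (by simp [PySem.Set.empty]))]
  intro x
  rw [mem_foldl_step x _ (fun pos => pos ∈ obstaculos ∧ x = pos)]
  · rw [mem_foldl_step x _ (fun o => Nbr pacman o ∧ x = o)]
    · simp only [PySem.Set.empty, List.not_mem_nil, false_or]
      constructor
      · rintro ⟨pos, hm, ho, rfl⟩
        exact ⟨x, ho, (mem_stage1 pacman x).1 hm, rfl⟩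
      · rintro ⟨o, ho, hn, rfl⟩
        exact ⟨x, (mem_stage1 pacman x).2 hn, ho, rfl⟩
    · intro s o
      split_ifs with h
      · rw [PySem.Set.mem_add]
        constructor
        · rintro (hs | rfl)
          · exact Or.inl hs
          · exact Or.inr ⟨h, rfl⟩
        · rintro (hs | ⟨_, rfl⟩)
          · exact Or.inl hs
          · exact Or.inr rfl
      · constructor
        · exact Or.inl
        · rintro (hs | ⟨hn, _⟩)
          · exact hs
          · exact absurd hn h
  · intro s pos
    split_ifs with h
    · rw [PySem.Set.mem_add]
      constructor
      · rintro (hs | rfl)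
        · exact Or.inl hs
        · exact Or.inr ⟨h, rfl⟩
      · rintro (hs | ⟨_, rfl⟩)
        · exact Or.inl hs
        · exact Or.inr rfl
    · constructor
      · exact Or.inl
      · rintro (hs | ⟨hm, _⟩)
        · exact hs
        · exact absurd hm h
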